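-- pv_equiv track=rewrite | github.com/Jxun-h/BOJ | 백준/Silver/25185. 카드 뽑기/카드 뽑기.py | check
-- ===== SOURCE A (Python) =====
-- from itertools import combinations
--
-- def check(data):
--     for temp in combinations(data, 3):
--         if (temp[0][1] == temp[1][1] == temp[2][1]) and (temp[0][0] == temp[1][0] - 1 == temp[2][0] - 2):
--             return ':)'
--
--     for d in set(data):
--         if data.count(d) == 3:
--             return ':)'
--
--     data_set = {0, 1, 2, 3}
--     for temp in combinations(data_set, 2):
--         t1_a, t1_b = temp
--         t2_a, t2_b = (data_set - set(temp))
--         if data[t1_a] == data[t1_b] and data[t2_a] == data[t2_b]: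
--             return ':)'
--
--     return ':('
-- ===== SOURCE B (Python) =====
-- from collections import Counter
--
--
-- def check(data):
--     # straight: one forward pass; seen holds (suit, value) of cards already
--     # passed, chain2 holds (suit, v) when values v-1, v occurred in order
--     # with that suit; a straight exists when (suit, v-1) is in chain2.
--     seen, chain2 = set(), set()
--     straight = False
--     for v, s in data:
--         if (s, v - 1) in chain2:
--             straight = True
--         if (s, v - 1) in seen:
--             chain2.add((s, v))
--         seen.add((s, v))
--
--     triple = any(c == 3 for c in Counter(data).values())
--
--     def two_pairs():
--         # two disjoint equal pairs among the four dealt cards exist iff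
--         # every multiplicity among them is even
--         cnt = Counter((data[0], data[1], data[2], data[3]))
--         return all(c % 2 == 0 for c in cnt.values())
--
--     return ':)' if straight or triple or two_pairs() else ':('
-- ===== Notes on version B (the rewrite author's own statement) =====
-- stated objective: faster
-- what changed: The cubic combinations(data,3) scan for a straight becomes one forward pass maintaining a 'seen' set and a 'two-consecutive-in-order' set, the triple test reads a Counter built once, and the six-way index-partition combinations loop for two pairs is replaced by a parity test on the multiplicities of the first four cards.
import Mathlib
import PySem

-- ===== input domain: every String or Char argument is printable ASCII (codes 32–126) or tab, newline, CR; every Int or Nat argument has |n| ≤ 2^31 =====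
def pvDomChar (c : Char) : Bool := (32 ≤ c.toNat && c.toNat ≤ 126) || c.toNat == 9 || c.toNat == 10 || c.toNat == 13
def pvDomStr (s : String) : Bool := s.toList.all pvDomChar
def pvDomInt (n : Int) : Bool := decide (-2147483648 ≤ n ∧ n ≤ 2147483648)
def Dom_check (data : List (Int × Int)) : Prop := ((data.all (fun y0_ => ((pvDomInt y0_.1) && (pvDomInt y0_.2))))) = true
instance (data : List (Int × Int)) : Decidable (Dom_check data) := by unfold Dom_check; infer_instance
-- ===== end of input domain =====

-- B replaces A's cubic straight scan by one forward pass with two sets, the triple test by a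
-- Counter built once, and the index-partition two-pair loop by a parity test on multiplicities
-- of the first four cards (objective: faster).


-- ===== PORT A =====
-- 'data_set = {0, 1, 2, 3}'
def pvDataSet : PySem.Set Int := PySem.Set.ofList [0, 1, 2, 3]

-- 'if (temp[0][1] == temp[1][1] == temp[2][1]) and (temp[0][0] == temp[1][0] - 1 == temp[2][0] - 2)'
def pvStraightPred (t : List (Int × Int)) : Bool :=
  match t with
  | [a, b, c] => a.2 == b.2 && b.2 == c.2 && a.1 == b.1 - 1 && b.1 - 1 == c.1 - 2
  | _ => false

def check (data : List (Int × Int)) : String :=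
  if (PySem.List.combinations data 3).any pvStraightPred then ":)"
  else if (PySem.Set.ofList data).any (fun d => PySem.List.count data d == 3) then ":)"
  else if (PySem.List.combinations pvDataSet 2).any (fun temp =>
        match temp, PySem.Set.diff pvDataSet (PySem.Set.ofList temp) with
        | [t1a, t1b], [t2a, t2b] =>
            PySem.List.pyGetD data t1a (0, 0) == PySem.List.pyGetD data t1b (0, 0) &&
            PySem.List.pyGetD data t2a (0, 0) == PySem.List.pyGetD data t2b (0, 0)
        | _, _ => false) then ":)"
  else ":("

-- ===== PORT B =====
-- state = (seen, chain2, straight): one step of the forward pass of Source B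
def pvStep (st : PySem.Set (Int × Int) × PySem.Set (Int × Int) × Bool) (card : Int × Int) :
    PySem.Set (Int × Int) × PySem.Set (Int × Int) × Bool :=
  let v := card.1
  let s := card.2
  (PySem.Set.add st.1 (s, v),
   if PySem.Set.contains st.1 (s, v - 1) then PySem.Set.add st.2.1 (s, v) else st.2.1,
   st.2.2 || PySem.Set.contains st.2.1 (s, v - 1))

def check_alt (data : List (Int × Int)) : String :=
  let straight := (data.foldl pvStep (PySem.Set.empty, PySem.Set.empty, false)).2.2
  let triple := (PySem.Dict.counter data).values.any (fun c => c == 3)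
  let pairs := (PySem.Dict.counter
      [PySem.List.pyGetD data 0 (0, 0), PySem.List.pyGetD data 1 (0, 0),
       PySem.List.pyGetD data 2 (0, 0), PySem.List.pyGetD data 3 (0, 0)]).values.all
      (fun cnt => PySem.Int.mod cnt 2 == 0)
  if straight || triple || pairs then ":)" else ":("

-- ===== PRECONDITION & SPEC =====
-- Pre_ admits every input on which A returns: lists of at least 4 cards, and shorter lists that
-- contain an in-order straight or an exact triple (there A returns ':)' before its two-pair check
-- can index data[0..3] and raise IndexError).
def Pre_check (data : List (Int × Int)) : Prop :=
  4 ≤ data.length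
    ∨ (∃ x ∈ data, [x, (x.1 + 1, x.2), (x.1 + 2, x.2)].Sublist data)
    ∨ (∃ x ∈ data, data.count x = 3)
instance (data : List (Int × Int)) : Decidable (Pre_check data) := by unfold Pre_check; infer_instance
def pvWitness_check : (List (Int × Int)) := [(1, 0), (5, 1), (2, 2), (9, 3)]

def Spec_check (data : List (Int × Int)) (out : String) : Prop := out = check_alt data
instance (data : List (Int × Int)) (out : String) : Decidable (Spec_check data out) := by unfold Spec_check; infer_instance

-- ===== CLAIM (what is proved, stated in full; the proofs are below) =====
def Claim_equal_check : Prop := ∀ (data : List (Int × Int)), Dom_check data → Pre_check data → Spec_check data (check data)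

-- ===== LEMMAS AND PROOFS =====

-- a straight, as a proposition: three cards of one suit with consecutive values, in the given order
def pvHasRun (l : List (Int × Int)) : Prop := ∃ v s : Int, [(v, s), (v + 1, s), (v + 2, s)].Sublist l

theorem pv_sublist2_append {α : Type} (x y c : α) (l : List α) :
    [x, y].Sublist (l ++ [c]) ↔ [x, y].Sublist l ∨ (x ∈ l ∧ y = c) := by
  rw [List.sublist_append_iff]
  constructor
  · rintro ⟨l₁, l₂, heq, h1, h2⟩
    rcases List.sublist_singleton.mp h2 with rfl | rfl
    · simp only [List.append_nil] at heq; subst heq; exact Or.inl h1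
    · rcases l₁ with _ | ⟨p, _ | ⟨q, l₁⟩⟩ <;> simp_all
  · rintro (h | ⟨hx, rfl⟩)
    · exact ⟨[x, y], [], by simp, h, by simp⟩
    · exact ⟨[x], [y], by simp, List.singleton_sublist.mpr hx, by simp⟩

theorem pv_sublist3_append {α : Type} (x y z c : α) (l : List α) :
    [x, y, z].Sublist (l ++ [c]) ↔ [x, y, z].Sublist l ∨ ([x, y].Sublist l ∧ z = c) := by
  rw [List.sublist_append_iff]
  constructor
  · rintro ⟨l₁, l₂, heq, h1, h2⟩
    rcases List.sublist_singleton.mp h2 with rfl | rfl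
    · simp only [List.append_nil] at heq; subst heq; exact Or.inl h1
    · rcases l₁ with _ | ⟨p, _ | ⟨q, _ | ⟨r, l₁⟩⟩⟩ <;> simp_all
  · rintro (h | ⟨hx, rfl⟩)
    · exact ⟨[x, y, z], [], by simp, h, by simp⟩
    · exact ⟨[x, y], [z], by simp, hx, by simp⟩

theorem pv_scan_inv (data : List (Int × Int)) :
    ∀ (pre : List (Int × Int)) (seen chain2 : PySem.Set (Int × Int)) (flag : Bool),
    (∀ p : Int × Int, p ∈ seen ↔ (p.2, p.1) ∈ pre) →
    (∀ p : Int × Int, p ∈ chain2 ↔ [(p.2 - 1, p.1), (p.2, p.1)].Sublist pre) →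
    (flag = true ↔ pvHasRun pre) →
    ((data.foldl pvStep (seen, chain2, flag)).2.2 = true ↔ pvHasRun (pre ++ data)) := by
  induction data with
  | nil => intro pre seen chain2 flag h1 h2 h3; simpa using h3
  | cons card rest ih =>
    intro pre seen chain2 flag h1 h2 h3
    obtain ⟨v0, s0⟩ := card
    have hseen : ∀ p : Int × Int, p ∈ PySem.Set.add seen (s0, v0) ↔ (p.2, p.1) ∈ pre ++ [(v0, s0)] := by
      intro p
      simp only [PySem.Set.mem_add, h1 p, List.mem_append, List.mem_singleton, Prod.ext_iff]
      constructor
      · rintro (h | ⟨hp1, hp2⟩)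
        · exact Or.inl h
        · exact Or.inr ⟨hp2, hp1⟩
      · rintro (h | ⟨hp1, hp2⟩)
        · exact Or.inl h
        · exact Or.inr ⟨hp2, hp1⟩
    have hchain : ∀ p : Int × Int,
        p ∈ (if PySem.Set.contains seen (s0, v0 - 1) then PySem.Set.add chain2 (s0, v0) else chain2) ↔
        [(p.2 - 1, p.1), (p.2, p.1)].Sublist (pre ++ [(v0, s0)]) := by
      intro p
      rw [pv_sublist2_append]
      by_cases hc : PySem.Set.contains seen (s0, v0 - 1) = true
      · have hmem : (v0 - 1, s0) ∈ pre := by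
          have := (PySem.Set.contains_iff seen (s0, v0 - 1)).mp hc
          simpa using (h1 (s0, v0 - 1)).mp this
        simp only [if_pos hc, PySem.Set.mem_add, h2 p, Prod.ext_iff]
        constructor
        · rintro (h | ⟨hp1, hp2⟩)
          · exact Or.inl h
          · subst hp1; subst hp2; exact Or.inr ⟨hmem, rfl, rfl⟩
        · rintro (h | ⟨hm, hp2, hp1⟩)
          · exact Or.inl h
          · right; constructor
            · exact hp1
            · exact hp2
      · have hnmem : (v0 - 1, s0) ∉ pre := by
          intro hm
          exact hc ((PySem.Set.contains_iff seen (s0, v0 - 1)).mpr ((h1 (s0, v0 - 1)).mpr (by simpa using hm)))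
        simp only [if_neg hc, h2 p, Prod.ext_iff]
        constructor
        · exact Or.inl
        · rintro (h | ⟨hm, hp2, hp1⟩)
          · exact h
          · exact absurd (by rw [hp1, hp2] at hm; simpa using hm) hnmem
    have hflag : (flag || PySem.Set.contains chain2 (s0, v0 - 1)) = true ↔ pvHasRun (pre ++ [(v0, s0)]) := by
      simp only [Bool.or_eq_true, h3]
      constructor
      · rintro (h | hc)
        · obtain ⟨v, s, hs⟩ := h
          exact ⟨v, s, hs.trans (List.sublist_append_left _ _)⟩
        · have hm : (s0, v0 - 1) ∈ chain2 := (PySem.Set.contains_iff chain2 (s0, v0 - 1)).mp hc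
          have hs := (h2 (s0, v0 - 1)).mp hm
          refine ⟨v0 - 2, s0, ?_⟩
          rw [pv_sublist3_append]
          right
          constructor
          · have hs' : [((v0 - 1 - 1 : Int), s0), (v0 - 1, s0)].Sublist pre := by simpa using hs
            have e1 : (v0 - 2 : Int) = v0 - 1 - 1 := by ring
            rw [e1]
            have e2 : (v0 - 1 - 1 + 1 : Int) = v0 - 1 := by ring
            rw [e2]
            exact hs'
          · norm_num
      · rintro ⟨v, s, hs⟩
        rw [pv_sublist3_append] at hs
        rcases hs with h | ⟨h2sub, heq⟩
        · exact Or.inl ⟨v, s, h⟩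
        · right
          apply (PySem.Set.contains_iff chain2 (s0, v0 - 1)).mpr
          apply (h2 (s0, v0 - 1)).mpr
          show [(v0 - 1 - 1, s0), (v0 - 1, s0)].Sublist pre
          simp only [Prod.mk.injEq] at heq
          obtain ⟨hv, hsx⟩ := heq
          subst hsx
          have e1 : (v0 - 1 - 1 : Int) = v := by omega
          rw [e1]
          have e2 : (v0 - 1 : Int) = v + 1 := by omega
          rw [e2]
          exact h2sub
    have := ih (pre ++ [(v0, s0)]) _ _ _ hseen hchain hflag
    simpa [pvStep] using this

theorem pv_combA_iff (data : List (Int × Int)) :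
    (PySem.List.combinations data 3).any pvStraightPred = true ↔ pvHasRun data := by
  rw [List.any_eq_true]
  constructor
  · rintro ⟨t, ht, hp⟩
    obtain ⟨hsub, hlen⟩ := (PySem.List.mem_combinations_iff data 3 t).mp ht
    rcases t with _ | ⟨a, _ | ⟨b, _ | ⟨c, _ | ⟨e, t⟩⟩⟩⟩
    · simp at hlen
    · simp at hlen
    · simp at hlen
    · simp only [pvStraightPred, Bool.and_eq_true, beq_iff_eq] at hp
      obtain ⟨⟨⟨h1, h2⟩, h3⟩, h4⟩ := hp
      refine ⟨a.1, a.2, ?_⟩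
      have hb : b = (a.1 + 1, a.2) := by
        obtain ⟨b1, b2⟩ := b; simp_all [Prod.ext_iff]; omega
      have hc : c = (a.1 + 2, a.2) := by
        obtain ⟨c1, c2⟩ := c; obtain ⟨b1, b2⟩ := b; simp_all [Prod.ext_iff]; try omega
      have ha : a = (a.1, a.2) := rfl
      rw [← ha, ← hb, ← hc]
      exact hsub
    · simp at hlen
  · rintro ⟨v, s, hs⟩
    refine ⟨[(v, s), (v + 1, s), (v + 2, s)], ?_, ?_⟩
    · exact (PySem.List.mem_combinations_iff data 3 _).mpr ⟨hs, rfl⟩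
    · simp [pvStraightPred]; try omega

theorem pv_scanB_iff (data : List (Int × Int)) :
    ((data.foldl pvStep (PySem.Set.empty, PySem.Set.empty, false)).2.2 = true) ↔ pvHasRun data := by
  have := pv_scan_inv data [] PySem.Set.empty PySem.Set.empty false
    (by simp [PySem.Set.empty]) (by simp [PySem.Set.empty]) (by simp [pvHasRun])
  simpa using this

theorem pv_straight_eq (data : List (Int × Int)) :
    (PySem.List.combinations data 3).any pvStraightPred
      = (data.foldl pvStep (PySem.Set.empty, PySem.Set.empty, false)).2.2 := by
  rw [Bool.eq_iff_iff, pv_combA_iff, pv_scanB_iff]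

theorem pv_triple_eq (data : List (Int × Int)) :
    (PySem.Set.ofList data).any (fun d => PySem.List.count data d == 3)
      = (PySem.Dict.counter data).values.any (fun c => c == 3) := by
  have hv : (PySem.Dict.counter data).values = ((PySem.Dict.counter data).items).map Prod.snd := rfl
  rw [hv, PySem.Dict.items_counter, List.map_map, List.any_map]
  apply PySem.List.any_congr_mem
  intro x hx
  simp [PySem.List.count_eq, Function.comp]
  omega

theorem pv_get0 (a b c d : Int × Int) (rest : List (Int × Int)) :
    PySem.List.pyGetD (a :: b :: c :: d :: rest) 0 (0, 0) = a := by simp [pysem]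

theorem pv_get1 (a b c d : Int × Int) (rest : List (Int × Int)) :
    PySem.List.pyGetD (a :: b :: c :: d :: rest) 1 (0, 0) = b := by simp [pysem]

theorem pv_get2 (a b c d : Int × Int) (rest : List (Int × Int)) :
    PySem.List.pyGetD (a :: b :: c :: d :: rest) 2 (0, 0) = c := by
  rw [PySem.List.pyGetD_ofNat']; simp

theorem pv_get3 (a b c d : Int × Int) (rest : List (Int × Int)) :
    PySem.List.pyGetD (a :: b :: c :: d :: rest) 3 (0, 0) = d := by
  rw [PySem.List.pyGetD_ofNat']; simp

theorem pv_pairA_expand (a b c d : Int × Int) (rest : List (Int × Int)) :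
    ((PySem.List.combinations (PySem.Set.ofList ([0, 1, 2, 3] : List Int)) 2).any (fun temp =>
        match temp, PySem.Set.diff (PySem.Set.ofList ([0, 1, 2, 3] : List Int)) (PySem.Set.ofList temp) with
        | [t1a, t1b], [t2a, t2b] =>
            PySem.List.pyGetD (a :: b :: c :: d :: rest) t1a (0, 0) == PySem.List.pyGetD (a :: b :: c :: d :: rest) t1b (0, 0) &&
            PySem.List.pyGetD (a :: b :: c :: d :: rest) t2a (0, 0) == PySem.List.pyGetD (a :: b :: c :: d :: rest) t2b (0, 0)
        | _, _ => false))
      = ((a == b && c == d) || (a == c && b == d) || (a == d && b == c)) := by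
  have hcomb : PySem.List.combinations (PySem.Set.ofList ([0, 1, 2, 3] : List Int)) 2
      = [[0, 1], [0, 2], [0, 3], [1, 2], [1, 3], [2, 3]] := by decide
  have hd01 : PySem.Set.diff (PySem.Set.ofList ([0, 1, 2, 3] : List Int)) (PySem.Set.ofList [0, 1]) = [2, 3] := by decide
  have hd02 : PySem.Set.diff (PySem.Set.ofList ([0, 1, 2, 3] : List Int)) (PySem.Set.ofList [0, 2]) = [1, 3] := by decide
  have hd03 : PySem.Set.diff (PySem.Set.ofList ([0, 1, 2, 3] : List Int)) (PySem.Set.ofList [0, 3]) = [1, 2] := by decide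
  have hd12 : PySem.Set.diff (PySem.Set.ofList ([0, 1, 2, 3] : List Int)) (PySem.Set.ofList [1, 2]) = [0, 3] := by decide
  have hd13 : PySem.Set.diff (PySem.Set.ofList ([0, 1, 2, 3] : List Int)) (PySem.Set.ofList [1, 3]) = [0, 2] := by decide
  have hd23 : PySem.Set.diff (PySem.Set.ofList ([0, 1, 2, 3] : List Int)) (PySem.Set.ofList [2, 3]) = [0, 1] := by decide
  rw [hcomb]
  simp only [List.any_cons, List.any_nil, hd01, hd02, hd03, hd12, hd13, hd23,
    pv_get0, pv_get1, pv_get2, pv_get3]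
  cases a == b <;> cases a == c <;> cases a == d <;> cases b == c <;> cases b == d <;> cases c == d <;> rfl

set_option maxHeartbeats 2000000 in
theorem pv_pairB_expand (a b c d : Int × Int) :
    (PySem.Dict.counter ([a, b, c, d] : List (Int × Int))).values.all
        (fun cnt => PySem.Int.mod cnt 2 == 0)
      = ((a == b && c == d) || (a == c && b == d) || (a == d && b == c)) := by
  have hv : (PySem.Dict.counter ([a, b, c, d] : List (Int × Int))).values
      = ((PySem.Dict.counter ([a, b, c, d] : List (Int × Int))).items).map Prod.snd := rfl
  rw [hv, PySem.Dict.items_counter, List.map_map, List.all_map]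
  have hfun : ((fun cnt => PySem.Int.mod cnt 2 == 0) ∘ Prod.snd ∘
        (fun k => (k, (([a, b, c, d] : List (Int × Int)).count k : Int))))
      = fun k => ([a, b, c, d] : List (Int × Int)).count k % 2 == 0 := by
    funext k
    simp only [Function.comp]
    rw [show ((2 : Int)) = ((2 : Nat) : Int) by norm_num, PySem.Int.mod_natCast]
    simp
    omega
  rw [hfun]
  by_cases hab : a = b <;> by_cases hac : a = c <;> by_cases had : a = d <;>
    by_cases hbc : b = c <;> by_cases hbd : b = d <;> by_cases hcd : c = d <;>
    subst_vars <;>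
    simp_all [PySem.Set.ofList, PySem.Set.add, PySem.Set.contains, List.count_cons, beq_iff_eq] <;>
    (try (split_ifs <;> simp_all)) <;>
    (try (intro x y hxy)) <;> (try (rcases hxy with rfl | rfl)) <;>
    (try (split_ifs <;> simp_all))

theorem pv_if_chain (S T E : Bool) :
    (if S then ":)" else if T then ":)" else if E then ":)" else ":(")
      = (if S || T || E then ":)" else ":(") := by
  cases S <;> cases T <;> cases E <;> rfl

theorem pv_run_exists_iff (data : List (Int × Int)) :
    (∃ x ∈ data, [x, (x.1 + 1, x.2), (x.1 + 2, x.2)].Sublist data) ↔ pvHasRun data := by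
  constructor
  · rintro ⟨x, _, h⟩
    exact ⟨x.1, x.2, h⟩
  · rintro ⟨v, s, h⟩
    exact ⟨(v, s), h.subset (by simp), h⟩

theorem pv_triple_exists_iff (data : List (Int × Int)) :
    ((PySem.Set.ofList data).any (fun d => PySem.List.count data d == 3) = true)
      ↔ ∃ x ∈ data, data.count x = 3 := by
  simp [List.any_eq_true, PySem.Set.mem_ofList, PySem.List.count_eq]

-- ===== VERDICT (by name: the statement is the Claim_ definition above) =====
theorem check_spec : Claim_equal_check := by
  intro data _ hpre
  unfold Spec_check
  cases hs : (PySem.List.combinations data 3).any pvStraightPred with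
  | true =>
    unfold check check_alt pvDataSet
    rw [hs, ← pv_straight_eq, hs]
    rfl
  | false =>
    cases ht : (PySem.Set.ofList data).any (fun d => PySem.List.count data d == 3) with
    | true =>
      unfold check check_alt pvDataSet
      rw [hs, ht, ← pv_straight_eq, ← pv_triple_eq, hs, ht]
      rfl
    | false =>
      have hlen : 4 ≤ data.length := by
        rcases hpre with h | h | h
        · exact h
        · exact absurd ((pv_combA_iff data).mpr ((pv_run_exists_iff data).mp h)) (by simp [hs])
        · exact absurd ((pv_triple_exists_iff data).mpr h) (by rw [ht]; exact Bool.false_ne_true)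
      rcases data with _ | ⟨a, _ | ⟨b, _ | ⟨c, _ | ⟨d, rest⟩⟩⟩⟩ <;> (try (simp at hlen))
      unfold check check_alt pvDataSet
      rw [pv_straight_eq, pv_triple_eq, pv_pairA_expand, pv_get0, pv_get1, pv_get2, pv_get3,
        pv_pairB_expand, pv_if_chain]
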